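-- pv_equiv track=rewrite | github.com/cornyhorse-tuis/sshaman | backend/ssh_config.py | _remove_block_from_text
-- ===== SOURCE A (Python) =====
-- def _remove_block_from_text(text: str, host_name: str) -> str:
--     """Return ``text`` with the ``Host <host_name>`` block removed.
--
--     The block extends from the ``Host`` line (or its preceding comments) to
--     the line before the next ``Host``/``Match`` line or end of file.  The
--     blank line separating blocks is also removed.
--
--     Args:
--         text: Full SSH config file content.
--         host_name: Alias to remove.
--
--     Returns:
--         Modified file content.
--     """
--     lines = text.splitlines(keepends=True)
--     result: list[str] = []
--     skip = False
--     pending: list[str] = []  # comment lines before a Host block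
--
--     i = 0
--     while i < len(lines):
--         raw = lines[i]
--         stripped = raw.strip()
--         lower = stripped.lower()
--
--         is_host = lower.startswith("host ") or lower == "host"
--         is_match = lower.startswith("match ")
--
--         if is_host or is_match:
--             alias = stripped[5:].strip() if lower.startswith("host ") else ""
--             if is_host and alias == host_name:
--                 # Discard pending comments that belong to this block
--                 pending = []
--                 skip = True
--                 i += 1
--                 continue
--             else:
--                 # Flush pending comments (they belong to this other block)
--                 result.extend(pending)
--                 pending = []
--                 skip = False
--                 result.append(raw)
--                 i += 1
--                 continue
--
--         if skip:
--             # Inside the block we're removing — drop content but stop at blank lines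
--             # between blocks (a blank line after the removed block should be consumed)
--             if not stripped:
--                 skip = False  # consume one trailing blank line
--             i += 1
--             continue
--
--         if stripped.startswith("#"):
--             pending.append(raw)
--         elif not stripped:
--             # Blank line flushes pending and passes through
--             result.extend(pending)
--             pending = []
--             result.append(raw)
--         else:
--             result.extend(pending)
--             pending = []
--             result.append(raw)
--
--         i += 1
--
--     # Flush any trailing pending comments
--     result.extend(pending)
--
--     return "".join(result)
-- ===== SOURCE B (Python) =====
-- def _remove_block_from_text(text: str, host_name: str) -> str:
--     """Return ``text`` with the ``Host <host_name>`` block removed.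
--
--     Lookahead formulation: a run of comment lines is kept unless it is
--     immediately followed by the Host line being removed; a removed block is
--     consumed up to the next Host/Match line or through one blank line.
--     """
--     lines = text.splitlines(keepends=True)
--     n = len(lines)
--
--     def is_host(s: str) -> bool:
--         l = s.lower()
--         return l.startswith("host ") or l == "host"
--
--     def is_match(s: str) -> bool:
--         return s.lower().startswith("match ")
--
--     def alias(s: str) -> str:
--         return s[5:].strip() if s.lower().startswith("host ") else ""
--
--     def removed(s: str) -> bool:
--         return is_host(s) and alias(s) == host_name
--
--     out: list[str] = []
--     i = 0
--     while i < n: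
--         s = lines[i].strip()
--         if s.startswith("#"):
--             j = i
--             while j < n and lines[j].strip().startswith("#"):
--                 j += 1
--             if not (j < n and removed(lines[j].strip())):
--                 out.extend(lines[i:j])
--             i = j
--         elif removed(s):
--             i += 1
--             while i < n:
--                 t = lines[i].strip()
--                 if is_host(t) or is_match(t):
--                     break
--                 if not t:
--                     i += 1
--                     break
--                 i += 1
--         else:
--             out.append(lines[i])
--             i += 1
--     return "".join(out)
-- ===== Notes on version B (the rewrite author's own statement) =====
-- stated objective: alternative
-- what changed: A's single pass with a skip flag and a pending comment buffer is replaced by a lookahead decomposition: B groups each contiguous comment run and keeps or drops it by peeking at the first non-comment line after it, and consumes a removed block with a dedicated inner scanner; no state variables survive between lines.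
import Mathlib
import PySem

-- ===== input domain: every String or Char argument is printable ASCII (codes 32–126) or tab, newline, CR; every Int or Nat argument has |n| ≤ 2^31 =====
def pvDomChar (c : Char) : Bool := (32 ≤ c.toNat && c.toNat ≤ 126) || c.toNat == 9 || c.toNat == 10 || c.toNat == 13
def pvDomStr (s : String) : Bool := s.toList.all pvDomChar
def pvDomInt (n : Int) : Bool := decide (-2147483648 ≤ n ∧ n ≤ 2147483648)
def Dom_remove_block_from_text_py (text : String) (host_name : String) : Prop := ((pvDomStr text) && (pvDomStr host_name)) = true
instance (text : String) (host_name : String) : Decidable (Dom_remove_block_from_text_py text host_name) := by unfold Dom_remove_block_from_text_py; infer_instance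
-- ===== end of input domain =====

-- B replaces A's pending-buffer state machine by a lookahead decomposition (comment runs grouped,
-- removed block consumed by a dedicated skip scanner); same return value, no speed claim.

-- shared builtin: str.splitlines(keepends=True), hand-ported step for step; exact on the stated
-- input domain (printable ASCII + tab/LF/CR), where the only line boundaries are '\n', '\r', '\r\n'.
def pySplitlinesKeep : List Char → List Char → List (List Char)
  | acc, [] => if acc = [] then [] else [acc.reverse]
  | acc, '\r' :: '\n' :: rest => (acc.reverse ++ ['\r', '\n']) :: pySplitlinesKeep [] rest
  | acc, '\r' :: rest => (acc.reverse ++ ['\r']) :: pySplitlinesKeep [] rest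
  | acc, '\n' :: rest => (acc.reverse ++ ['\n']) :: pySplitlinesKeep [] rest
  | acc, c :: rest => pySplitlinesKeep (c :: acc) rest

-- ===== PORT A =====
-- A's while-loop over `lines` with state (skip, pending), returning the emitted lines.
def pyALoop (host_name : List Char) : List (List Char) → Bool → List (List Char) → List (List Char)
  | [], _, pending => pending
  | raw :: rest, skip, pending =>
    let stripped := PySem.Chars.strip raw
    let lower := PySem.Chars.lower stripped
    let is_host := PySem.Chars.startswith lower ['h','o','s','t',' '] || lower == ['h','o','s','t']
    let is_match := PySem.Chars.startswith lower ['m','a','t','c','h',' ']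
    if is_host || is_match then
      let alias_ := if PySem.Chars.startswith lower ['h','o','s','t',' '] then
          PySem.Chars.strip (PySem.Chars.slice stripped (some 5) none) else []
      if is_host && (alias_ == host_name) then
        pyALoop host_name rest true []
      else
        pending ++ [raw] ++ pyALoop host_name rest false []
    else if skip then
      (if stripped == [] then pyALoop host_name rest false pending
       else pyALoop host_name rest true pending)
    else if PySem.Chars.startswith stripped ['#'] then
      pyALoop host_name rest skip (pending ++ [raw])
    else if stripped == [] then
      pending ++ [raw] ++ pyALoop host_name rest skip []
    else
      pending ++ [raw] ++ pyALoop host_name rest skip []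

def remove_block_from_text_py (text : String) (host_name : String) : String :=
  String.ofList (pyALoop host_name.toList (pySplitlinesKeep [] text.toList) false []).flatten

-- ===== PORT B =====
def pyBIsHost (s : List Char) : Bool :=
  let l := PySem.Chars.lower s
  PySem.Chars.startswith l ['h','o','s','t',' '] || l == ['h','o','s','t']

def pyBIsMatch (s : List Char) : Bool :=
  PySem.Chars.startswith (PySem.Chars.lower s) ['m','a','t','c','h',' ']

def pyBAlias (s : List Char) : List Char :=
  if PySem.Chars.startswith (PySem.Chars.lower s) ['h','o','s','t',' '] then
    PySem.Chars.strip (PySem.Chars.slice s (some 5) none) else []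

def pyBRemoved (host_name s : List Char) : Bool :=
  pyBIsHost s && (pyBAlias s == host_name)

def pyBComment (raw : List Char) : Bool :=
  PySem.Chars.startswith (PySem.Chars.strip raw) ['#']

-- the inner skip loop of B: consume the removed block up to (excluding) the next Host/Match
-- line or through one blank line
def pyBSkip : List (List Char) → List (List Char)
  | [] => []
  | raw :: rest =>
    let t := PySem.Chars.strip raw
    if pyBIsHost t || pyBIsMatch t then raw :: rest
    else if t == [] then rest
    else pyBSkip rest

-- (cited by pyBGo's decreasing_by)
lemma pyBSkip_length_le (l : List (List Char)) : (pyBSkip l).length ≤ l.length := by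
  induction l with
  | nil => simp [pyBSkip]
  | cons raw rest ih =>
    simp only [pyBSkip]
    split_ifs <;> simp <;> omega

-- B's main loop: group a comment run with a lookahead at the first non-comment line after it
def pyBGo (host_name : List Char) : List (List Char) → List (List Char)
  | [] => []
  | raw :: rest =>
    if pyBComment raw then
      let run := raw :: rest.takeWhile pyBComment
      match hdw : rest.dropWhile pyBComment with
      | [] => run
      | m :: t =>
        if pyBRemoved host_name (PySem.Chars.strip m) then pyBGo host_name (m :: t)
        else run ++ pyBGo host_name (m :: t)
    else if pyBRemoved host_name (PySem.Chars.strip raw) then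
      pyBGo host_name (pyBSkip rest)
    else
      raw :: pyBGo host_name rest
  termination_by l => l.length
  decreasing_by
  · have h1 : (rest.dropWhile pyBComment).length ≤ rest.length := rest.length_dropWhile_le pyBComment
    rw [hdw] at h1; simp at h1 ⊢; omega
  · have h1 : (rest.dropWhile pyBComment).length ≤ rest.length := rest.length_dropWhile_le pyBComment
    rw [hdw] at h1; simp at h1 ⊢; omega
  · have := pyBSkip_length_le rest; simp; omega
  · simp

def remove_block_from_text_py_alt (text : String) (host_name : String) : String :=
  String.ofList (pyBGo host_name.toList (pySplitlinesKeep [] text.toList)).flatten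

-- ===== PRECONDITION & SPEC =====
def Spec_remove_block_from_text_py (text : String) (host_name : String) (out : String) : Prop := out = remove_block_from_text_py_alt text host_name
instance (text : String) (host_name : String) (out : String) : Decidable (Spec_remove_block_from_text_py text host_name out) := by unfold Spec_remove_block_from_text_py; infer_instance

-- ===== CLAIM (what is proved, stated in full; the proofs are below) =====
def Claim_equal_remove_block_from_text_py : Prop := ∀ (text : String) (host_name : String), Dom_remove_block_from_text_py text host_name → Spec_remove_block_from_text_py text host_name (remove_block_from_text_py text host_name)

-- ===== LEMMAS AND PROOFS =====

-- a comment line is neither a Host nor a Match line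
lemma comment_not_host {raw : List Char} (h : pyBComment raw = true) :
    pyBIsHost (PySem.Chars.strip raw) = false ∧ pyBIsMatch (PySem.Chars.strip raw) = false := by
  simp only [pyBComment] at h
  rw [PySem.Chars.startswith_iff] at h
  obtain ⟨u, hu⟩ := h
  simp only [pyBIsHost, pyBIsMatch, ← hu]
  constructor
  · simp [PySem.Chars.startswith, List.isPrefixOf, PySem.Chars.lower,
      PySem.Chars.lowerChar, PySem.Chars.isupper]
  · simp [PySem.Chars.startswith, List.isPrefixOf, PySem.Chars.lower,
      PySem.Chars.lowerChar, PySem.Chars.isupper]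

-- one-step unfoldings of A's loop, phrased through B's line predicates
lemma aLoop_step_removed (hn raw : List Char) (rest : List (List Char)) (skip : Bool)
    (pending : List (List Char)) (h : pyBRemoved hn (PySem.Chars.strip raw) = true) :
    pyALoop hn (raw :: rest) skip pending = pyALoop hn rest true [] := by
  simp only [pyBRemoved, pyBIsHost, pyBAlias, Bool.and_eq_true, Bool.or_eq_true] at h
  simp only [pyALoop]
  split_ifs <;> simp_all

lemma aLoop_step_hostmatch (hn raw : List Char) (rest : List (List Char)) (skip : Bool)
    (pending : List (List Char))
    (h1 : (pyBIsHost (PySem.Chars.strip raw) || pyBIsMatch (PySem.Chars.strip raw)) = true)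
    (h2 : pyBRemoved hn (PySem.Chars.strip raw) = false) :
    pyALoop hn (raw :: rest) skip pending = pending ++ [raw] ++ pyALoop hn rest false [] := by
  simp only [pyBRemoved, pyBIsHost, pyBIsMatch, pyBAlias, Bool.or_eq_true,
    Bool.and_eq_false_iff, Bool.or_eq_false_iff] at h1 h2
  simp only [pyALoop]
  split_ifs <;> simp_all

lemma aLoop_step_comment (hn raw : List Char) (rest : List (List Char))
    (pending : List (List Char)) (h : pyBComment raw = true) :
    pyALoop hn (raw :: rest) false pending = pyALoop hn rest false (pending ++ [raw]) := by
  obtain ⟨hh, hm⟩ := comment_not_host h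
  simp only [pyBComment] at h
  simp only [pyBIsHost, pyBIsMatch] at hh hm
  simp only [pyALoop]
  split_ifs <;> simp_all

lemma aLoop_step_plain (hn raw : List Char) (rest : List (List Char))
    (pending : List (List Char))
    (h1 : (pyBIsHost (PySem.Chars.strip raw) || pyBIsMatch (PySem.Chars.strip raw)) = false)
    (h2 : pyBComment raw = false) :
    pyALoop hn (raw :: rest) false pending = pending ++ [raw] ++ pyALoop hn rest false [] := by
  simp only [pyBComment] at h2
  simp only [pyBIsHost, pyBIsMatch, Bool.or_eq_false_iff] at h1
  simp only [pyALoop]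
  split_ifs <;> simp_all

lemma aLoop_step_skip_blank (hn raw : List Char) (rest : List (List Char))
    (pending : List (List Char))
    (h1 : (pyBIsHost (PySem.Chars.strip raw) || pyBIsMatch (PySem.Chars.strip raw)) = false)
    (h2 : (PySem.Chars.strip raw == ([] : List Char)) = true) :
    pyALoop hn (raw :: rest) true pending = pyALoop hn rest false pending := by
  simp only [pyBIsHost, pyBIsMatch, Bool.or_eq_false_iff] at h1
  simp only [pyALoop]
  split_ifs <;> simp_all

lemma aLoop_step_skip_other (hn raw : List Char) (rest : List (List Char))
    (pending : List (List Char))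
    (h1 : (pyBIsHost (PySem.Chars.strip raw) || pyBIsMatch (PySem.Chars.strip raw)) = false)
    (h2 : (PySem.Chars.strip raw == ([] : List Char)) = false) :
    pyALoop hn (raw :: rest) true pending = pyALoop hn rest true pending := by
  simp only [pyBIsHost, pyBIsMatch, Bool.or_eq_false_iff] at h1
  simp only [pyALoop]
  split_ifs <;> simp_all

-- flushing: on a non-comment, non-removed head with skip = False, `pending` is emitted first
lemma aLoop_flush (hn m : List Char) (t pending : List (List Char))
    (hc : pyBComment m = false) (hr : pyBRemoved hn (PySem.Chars.strip m) = false) :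
    pyALoop hn (m :: t) false pending = pending ++ pyALoop hn (m :: t) false [] := by
  by_cases h1 : (pyBIsHost (PySem.Chars.strip m) || pyBIsMatch (PySem.Chars.strip m)) = true
  · rw [aLoop_step_hostmatch hn m t false pending h1 hr,
      aLoop_step_hostmatch hn m t false [] h1 hr]
    simp
  · rw [aLoop_step_plain hn m t pending (by simpa using h1) hc,
      aLoop_step_plain hn m t [] (by simpa using h1) hc]
    simp

-- accumulation: A passes an unbroken comment run into `pending`
lemma aLoop_comments (hn : List Char) (run : List (List Char)) :
    ∀ rest pending, (∀ l ∈ run, pyBComment l = true) →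
    pyALoop hn (run ++ rest) false pending = pyALoop hn rest false (pending ++ run) := by
  induction run with
  | nil => intro rest pending _; simp
  | cons c run' ih =>
    intro rest pending hcm
    rw [List.cons_append, aLoop_step_comment hn c (run' ++ rest) pending (hcm c (by simp)),
      ih rest (pending ++ [c]) (fun l hl => hcm l (by simp [hl]))]
    simp

lemma main_equiv (hn : List Char) : ∀ n (lines : List (List Char)), lines.length ≤ n →
    pyALoop hn lines false [] = pyBGo hn lines ∧
    pyALoop hn lines true [] = pyBGo hn (pyBSkip lines) := by
  intro n
  induction n with
  | zero =>
    intro lines hl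
    have hnil : lines = [] := by cases lines <;> simp_all
    subst hnil; simp [pyALoop, pyBGo, pyBSkip]
  | succ n ih =>
    intro lines hl
    cases lines with
    | nil => simp [pyALoop, pyBGo, pyBSkip]
    | cons raw rest =>
      simp only [List.length_cons, Nat.succ_le_succ_iff] at hl
      constructor
      · -- skip = False
        by_cases hc : pyBComment raw = true
        · -- comment head: A accumulates the run into pending; B groups it with lookahead
          rw [aLoop_step_comment hn raw rest [] hc]
          have hsplit : rest = rest.takeWhile pyBComment ++ rest.dropWhile pyBComment :=
            (List.takeWhile_append_dropWhile).symm
          rw [show pyALoop hn rest false ([] ++ [raw]) =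
              pyALoop hn (rest.takeWhile pyBComment ++ rest.dropWhile pyBComment) false [raw] by
              rw [← hsplit]; rfl,
            aLoop_comments hn _ _ _ (fun l hl => List.mem_takeWhile_imp hl)]
          rw [pyBGo, if_pos hc]
          cases hdw : rest.dropWhile pyBComment with
          | nil =>
            simp only [pyALoop]
            rfl
          | cons m t =>
            have hmnc : pyBComment m = false := by
              have := List.head_dropWhile_not (p := pyBComment) (l := rest) (by simp [hdw])
              simpa [hdw] using this
            have hlen : (m :: t).length ≤ rest.length := by
              have h' := rest.length_dropWhile_le pyBComment
              rw [hdw] at h'; exact h'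
            simp only [hdw]
            by_cases hr : pyBRemoved hn (PySem.Chars.strip m) = true
            · -- removed Host after a comment run: the run is discarded
              rw [aLoop_step_removed hn m t false _ hr, if_pos hr]
              rw [pyBGo, if_neg (by simp [hmnc]), if_pos hr]
              have ht : t.length ≤ n := by
                have : (m :: t).length = t.length + 1 := by simp
                omega
              exact (ih t ht).2
            · rw [if_neg hr,
                aLoop_flush hn m t _ hmnc (by simpa using hr),
                (ih (m :: t) (le_trans hlen hl)).1]
              simp
        · by_cases hr : pyBRemoved hn (PySem.Chars.strip raw) = true
          · rw [aLoop_step_removed hn raw rest false [] hr,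
              pyBGo, if_neg (by simp [hc]), if_pos hr]
            exact (ih rest hl).2
          · rw [aLoop_flush hn raw rest [] (by simpa using hc) (by simpa using hr),
              pyBGo, if_neg (by simp [hc]), if_neg hr]
            by_cases h1 : (pyBIsHost (PySem.Chars.strip raw) || pyBIsMatch (PySem.Chars.strip raw)) = true
            · rw [aLoop_step_hostmatch hn raw rest false [] h1 (by simpa using hr),
                (ih rest hl).1]
              simp
            · rw [aLoop_step_plain hn raw rest [] (by simpa using h1) (by simpa using hc),
                (ih rest hl).1]
              simp
      · -- skip = True
        by_cases h1 : (pyBIsHost (PySem.Chars.strip raw) || pyBIsMatch (PySem.Chars.strip raw)) = true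
        · -- Host/Match line ends the skip; B's scanner stops without consuming it
          have hskip : pyBSkip (raw :: rest) = raw :: rest := by
            simp only [pyBSkip]; rw [if_pos h1]
          rw [hskip]
          have hcf : pyBComment raw = false := by
            by_contra hcc
            obtain ⟨hh, hm⟩ := comment_not_host (by simpa using hcc)
            simp [hh, hm] at h1
          by_cases hr : pyBRemoved hn (PySem.Chars.strip raw) = true
          · rw [aLoop_step_removed hn raw rest true [] hr,
              pyBGo, if_neg (by simp [hcf]), if_pos hr]
            exact (ih rest hl).2
          · rw [aLoop_step_hostmatch hn raw rest true [] h1 (by simpa using hr),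
              pyBGo, if_neg (by simp [hcf]), if_neg hr,
              (ih rest hl).1]
            simp
        · by_cases hb : (PySem.Chars.strip raw == ([] : List Char)) = true
          · -- blank line: skip consumes it and ends
            have hskip : pyBSkip (raw :: rest) = rest := by
              simp only [pyBSkip]; rw [if_neg (by simp_all), if_pos hb]
            rw [hskip, aLoop_step_skip_blank hn raw rest [] (by simpa using h1) hb]
            exact (ih rest hl).1
          · -- any other line inside the removed block is dropped
            have hskip : pyBSkip (raw :: rest) = pyBSkip rest := by
              simp only [pyBSkip]; rw [if_neg (by simp_all), if_neg (by simp_all)]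
            rw [hskip, aLoop_step_skip_other hn raw rest [] (by simpa using h1) (by simpa using hb)]
            exact (ih rest hl).2

-- ===== VERDICT (by name: the statement is the Claim_ definition above) =====
theorem remove_block_from_text_py_spec : Claim_equal_remove_block_from_text_py := by
  intro text host_name _
  unfold Spec_remove_block_from_text_py remove_block_from_text_py remove_block_from_text_py_alt
  rw [(main_equiv host_name.toList (pySplitlinesKeep [] text.toList).length
    (pySplitlinesKeep [] text.toList) le_rfl).1]
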